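-- pv_equiv track=rewrite | github.com/robalford/command_line_tictactoe | tictactoe.py | draw_current_board
-- ===== SOURCE A (Python) =====
-- SPACES_ON_BOARD = range(1, 10)
--
-- def draw_current_board(board, players_moves):
--     for player, moves in players_moves.items():
--         for move in moves:
--             if str(move) in board:
--                 board = board.replace(str(move), player)
--     for space in SPACES_ON_BOARD:
--         if str(space) in board:
--             board = board.replace(str(space), ' ')
--     return board
-- ===== SOURCE B (Python) =====
-- SPACES_ON_BOARD = range(1, 10)
--
-- def draw_current_board(board, players_moves):
--     # Claim each move's digits for its player by splitting on the move's string
--     # and rejoining with the player's mark (no str.replace, no membership guard).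
--     for player, moves in players_moves.items():
--         for move in moves:
--             board = player.join(board.split(str(move)))
--     # Blank every remaining space digit in one character-wise pass.
--     return ''.join(' ' if '1' <= c <= '9' else c for c in board)
-- ===== Notes on version B (the rewrite author's own statement) =====
-- stated objective: alternative
-- what changed: B claims each move by split-on-pattern + join-with-mark instead of guarded str.replace, and blanks the nine space digits in one character-wise comprehension pass instead of nine sequential str.replace scans.
import Mathlib
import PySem

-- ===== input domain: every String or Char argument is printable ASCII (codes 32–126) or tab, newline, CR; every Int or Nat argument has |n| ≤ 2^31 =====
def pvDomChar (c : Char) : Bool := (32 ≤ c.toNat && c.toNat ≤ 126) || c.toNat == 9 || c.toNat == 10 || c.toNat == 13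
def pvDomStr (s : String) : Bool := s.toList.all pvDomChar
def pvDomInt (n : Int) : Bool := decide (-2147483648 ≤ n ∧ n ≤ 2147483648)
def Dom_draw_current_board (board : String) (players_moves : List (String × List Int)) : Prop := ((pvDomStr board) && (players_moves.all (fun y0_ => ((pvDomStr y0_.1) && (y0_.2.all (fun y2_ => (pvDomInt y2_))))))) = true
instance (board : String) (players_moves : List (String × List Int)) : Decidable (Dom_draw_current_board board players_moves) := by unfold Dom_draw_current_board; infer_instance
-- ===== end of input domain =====

-- B claims each move by split-on-pattern + join-with-mark and blanks the space digits in one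
-- character-wise pass, instead of A's guarded str.replace cascade: an alternative mechanism.

-- ===== PORT A =====
def draw_current_board (board : String) (players_moves : List (String × List Int)) : String :=
  -- for player, moves in players_moves.items(): for move in moves: if str(move) in board: board = board.replace(...)
  let b1 := players_moves.foldl (fun b pm =>
    pm.2.foldl (fun b move =>
      if PySem.Str.isIn (PySem.Int.toStr move) b then
        PySem.Str.replace b (PySem.Int.toStr move) pm.1
      else b) b) board
  -- for space in SPACES_ON_BOARD: if str(space) in board: board = board.replace(str(space), ' ')
  (PySem.List.pyRange 1 10 1).foldl (fun b space =>
    if PySem.Str.isIn (PySem.Int.toStr space) b then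
      PySem.Str.replace b (PySem.Int.toStr space) " "
    else b) b1

-- ===== PORT B =====
-- board.split(sep): PySem.Chars.splitOn is the sep ≠ "" form of str.split, exact here because
-- B only ever splits on str(move), which is never empty.
def pySplitNE (s sep : String) : List String :=
  (PySem.Chars.splitOn s.toList sep.toList).map String.ofList

def draw_current_board_alt (board : String) (players_moves : List (String × List Int)) : String :=
  -- for player, moves in players_moves.items(): for move in moves: board = player.join(board.split(str(move)))
  let b1 := players_moves.foldl (fun b pm =>
    pm.2.foldl (fun b move => PySem.Str.join pm.1 (pySplitNE b (PySem.Int.toStr move))) b) board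
  -- ''.join(' ' if '1' <= c <= '9' else c for c in board)
  String.ofList (b1.toList.map (fun c => if '1' ≤ c ∧ c ≤ '9' then ' ' else c))

-- ===== PRECONDITION & SPEC =====
def Spec_draw_current_board (board : String) (players_moves : List (String × List Int)) (out : String) : Prop := out = draw_current_board_alt board players_moves
instance (board : String) (players_moves : List (String × List Int)) (out : String) : Decidable (Spec_draw_current_board board players_moves out) := by unfold Spec_draw_current_board; infer_instance

-- ===== CLAIM (what is proved, stated in full; the proofs are below) =====
def Claim_equal_draw_current_board : Prop := ∀ (board : String) (players_moves : List (String × List Int)), Dom_draw_current_board board players_moves → Spec_draw_current_board board players_moves (draw_current_board board players_moves)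

-- ===== LEMMAS AND PROOFS =====

-- ---- A's membership guard before a replace is redundant ----

theorem pv_go_noocc (old new : List Char) : ∀ (s : List Char) (fuel : Nat) (acc : List Char),
    s.length ≤ fuel → (∀ j, ¬ old <+: s.drop j) →
    PySem.Chars.replace.go old new fuel s acc = acc.reverse ++ s := by
  intro s
  induction s with
  | nil =>
    intro fuel acc _ _
    cases fuel <;> simp [PySem.Chars.replace.go]
  | cons c t ih =>
    intro fuel acc hf hno
    cases fuel with
    | zero => simp at hf
    | succ f =>
      have hpre : old.isPrefixOf (c :: t) = false := by
        by_contra h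
        exact hno 0 (by simpa using List.isPrefixOf_iff_prefix.mp (by simpa using h))
      rw [PySem.Chars.replace.go]
      simp only [hpre]
      rw [ih f (c :: acc) (by simpa using Nat.lt_succ_iff.mp (Nat.lt_succ_of_le hf))
            (fun j => by simpa using hno (j + 1))]
      simp

theorem pv_replace_noocc (s old new : String) (h : PySem.Str.isIn old s = false) :
    PySem.Str.replace s old new = s := by
  have hne : old.toList ≠ [] := by
    intro hnil
    have := PySem.Chars.isIn_nil s.toList
    rw [PySem.Str.isIn_eq, hnil] at h
    simp [this] at h
  have hno : ∀ j, ¬ old.toList <+: s.toList.drop j := by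
    intro j hj
    have := (PySem.Chars.exists_prefix_drop_iff_isIn old.toList s.toList).mp ⟨j, hj⟩
    rw [PySem.Str.isIn_eq] at h
    simp [h] at this
  unfold PySem.Str.replace PySem.Chars.replace
  rw [if_neg (by simpa using hne)]
  rw [pv_go_noocc _ _ _ _ _ (le_refl _) hno]
  simp

@[simp] theorem pv_guard_step (b p m : String) :
    (if PySem.Str.isIn p b then PySem.Str.replace b p m else b) = PySem.Str.replace b p m := by
  by_cases h : PySem.Str.isIn p b = true
  · rw [if_pos h]
  · rw [if_neg h]
    exact (pv_replace_noocc b p m (by simpa using h)).symm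

-- ---- new.join(s.split(old)) = s.replace(old, new) for old ≠ '' ----

theorem pv_join_snoc (new : List Char) (xs : List (List Char)) (y : List Char) :
    PySem.Chars.join new (xs ++ [y]) =
      PySem.Chars.join new xs ++ (if xs.isEmpty then [] else new) ++ y := by
  induction xs with
  | nil => simp [PySem.Chars.join, List.intercalate]
  | cons a as ih =>
    cases as with
    | nil => simp [PySem.Chars.join, List.intercalate, List.intersperse]
    | cons b bs =>
      have step : ∀ (zs : List (List Char)), List.intercalate new (a :: b :: zs)
          = a ++ new ++ List.intercalate new (b :: zs) := by
        intro zs; simp [List.intercalate, List.intersperse]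
      simp only [PySem.Chars.join] at *
      rw [show a :: b :: bs ++ [y] = a :: b :: (bs ++ [y]) from rfl, step (bs ++ [y]), step bs]
      rw [show b :: bs ++ [y] = b :: (bs ++ [y]) from rfl] at ih
      rw [ih]; simp

theorem pv_go_acc (old new : List Char) : ∀ (fuel : Nat) (l acc : List Char),
    PySem.Chars.replace.go old new fuel l acc =
      acc.reverse ++ PySem.Chars.replace.go old new fuel l [] := by
  intro fuel
  induction fuel with
  | zero => intro l acc; simp [PySem.Chars.replace.go]
  | succ f ih =>
    intro l acc
    cases l with
    | nil => simp [PySem.Chars.replace.go]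
    | cons c t =>
      rw [PySem.Chars.replace.go, PySem.Chars.replace.go]
      by_cases h : old.isPrefixOf (c :: t) = true
      · simp only [h, if_pos]
        rw [ih _ (new.reverse ++ acc), ih _ (new.reverse ++ [])]
        simp
      · rw [if_neg (by simp [h]), if_neg (by simp [h])]
        rw [ih _ (c :: acc), ih _ (c :: [])]
        simp

theorem pv_go_fuel (old new : List Char) (hold : old ≠ []) : ∀ (fuel : Nat) (l acc : List Char),
    l.length ≤ fuel →
    PySem.Chars.replace.go old new (fuel + 1) l acc = PySem.Chars.replace.go old new fuel l acc := by
  intro fuel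
  induction fuel with
  | zero =>
    intro l acc h
    have : l = [] := List.eq_nil_of_length_eq_zero (Nat.le_zero.mp h)
    subst this
    simp [PySem.Chars.replace.go]
  | succ f ih =>
    intro l acc h
    cases l with
    | nil => simp [PySem.Chars.replace.go]
    | cons c t =>
      rw [PySem.Chars.replace.go]
      conv_rhs => rw [PySem.Chars.replace.go]
      by_cases hp : old.isPrefixOf (c :: t) = true
      · simp only [hp, if_pos]
        apply ih
        have hge : old.length ≥ 1 := by
          cases old with
          | nil => exact absurd rfl hold
          | cons _ _ => simp
        simp only [List.length_drop, List.length_cons] at *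
        omega
      · rw [if_neg (by simp [hp]), if_neg (by simp [hp])]
        apply ih
        simp only [List.length_cons] at h
        omega

theorem pv_splitgo_join (sep new : List Char) (hsep : sep ≠ []) :
    ∀ (fuel : Nat) (l cur : List Char) (acc : List (List Char)), l.length ≤ fuel →
    PySem.Chars.join new (PySem.Chars.splitOn.go sep fuel l cur acc) =
      PySem.Chars.join new acc.reverse ++ (if acc.isEmpty then [] else new) ++
        cur.reverse ++ PySem.Chars.replace.go sep new fuel l [] := by
  intro fuel
  induction fuel with
  | zero =>
    intro l cur acc h
    have : l = [] := List.eq_nil_of_length_eq_zero (Nat.le_zero.mp h)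
    subst this
    rw [PySem.Chars.splitOn.go, PySem.Chars.replace.go]
    simp only [List.append_nil, List.reverse_cons]
    rw [pv_join_snoc]
    simp
  | succ f ih =>
    intro l cur acc h
    cases l with
    | nil =>
      rw [PySem.Chars.splitOn.go, PySem.Chars.replace.go]
      simp only [List.reverse_cons]
      rw [pv_join_snoc]
      · simp
      all_goals omega
    | cons c t =>
      rw [PySem.Chars.splitOn.go, PySem.Chars.replace.go]
      by_cases hp : sep.isPrefixOf (c :: t) = true
      · simp only [hp, if_pos]
        have hge : sep.length ≥ 1 := by
          cases sep with
          | nil => exact absurd rfl hsep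
          | cons _ _ => simp
        have hlen : ((c :: t).drop sep.length).length ≤ f := by
          simp only [List.length_drop, List.length_cons] at *
          omega
        rw [ih _ [] (cur.reverse :: acc) hlen]
        rw [pv_go_acc sep new f _ (new.reverse ++ [])]
        simp only [List.reverse_cons]
        rw [pv_join_snoc]
        simp
      · have hp' : sep.isPrefixOf (c :: t) = false := by simp [hp]
        simp only [hp', Bool.false_eq_true, if_false]
        have hlen : t.length ≤ f := by simp only [List.length_cons] at h; omega
        rw [ih t (c :: cur) acc hlen]
        rw [pv_go_acc sep new f t [c]]
        simp only [List.reverse_cons, List.reverse_nil, List.nil_append, List.append_assoc,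
          List.singleton_append]

-- ---- str(move) is never the empty string ----

theorem pv_toDigitsCore_len (b : Nat) : ∀ (fuel n : Nat) (ds : List Char),
    ds.length ≤ (Nat.toDigitsCore b fuel n ds).length := by
  intro fuel
  induction fuel with
  | zero => intro n ds; simp [Nat.toDigitsCore]
  | succ f ih =>
    intro n ds
    rw [Nat.toDigitsCore]
    split_ifs
    · simp
    · calc ds.length ≤ (Nat.digitChar (n % b) :: ds).length := by simp
        _ ≤ _ := ih _ _

theorem pv_toDigits_ne_nil (n : Nat) : Nat.toDigits 10 n ≠ [] := by
  intro h
  unfold Nat.toDigits at h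
  rw [Nat.toDigitsCore] at h
  split_ifs at h
  all_goals first
    | exact List.cons_ne_nil _ _ h
    | (have := pv_toDigitsCore_len 10 n (n / 10) [Nat.digitChar (n % 10)]
       rw [h] at this
       simp at this)

theorem pv_toChars_ne_nil (n : Int) : PySem.Int.toChars n ≠ [] := by
  unfold PySem.Int.toChars
  split_ifs
  · simp
  · exact pv_toDigits_ne_nil _

-- B's split+join step equals A's (guardless) replace step
theorem pv_splitjoin_eq_replace (b p : String) (m : Int) :
    PySem.Str.join p (pySplitNE b (PySem.Int.toStr m)) =
      PySem.Str.replace b (PySem.Int.toStr m) p := by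
  unfold pySplitNE
  have hsep : (PySem.Int.toStr m).toList ≠ [] := by
    rw [PySem.Int.toList_toStr]; exact pv_toChars_ne_nil m
  apply String.toList_inj.mp
  rw [PySem.Str.toList_join, PySem.Str.toList_replace]
  rw [PySem.Chars.splitOn]
  rw [List.map_map]
  rw [show (String.toList ∘ String.ofList) = id from funext (fun l => by simp)]
  rw [List.map_id]
  rw [pv_splitgo_join _ p.toList hsep _ _ _ _ (by simp)]
  rw [pv_go_fuel _ _ hsep _ _ _ (le_refl _)]
  rw [PySem.Chars.replace]
  have hie : (PySem.Int.toStr m).toList.isEmpty = false := by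
    rw [PySem.Int.toList_toStr]
    simpa using pv_toChars_ne_nil m
  rw [hie]
  simp [PySem.Chars.join, List.intercalate]

-- ---- phase 2: nine sequential single-char blanking replaces = one character-wise map ----

theorem pv_go_single (d e : Char) : ∀ (fuel : Nat) (l acc : List Char), l.length ≤ fuel →
    PySem.Chars.replace.go [d] [e] fuel l acc =
      acc.reverse ++ l.map (fun c => if c = d then e else c) := by
  intro fuel
  induction fuel with
  | zero =>
    intro l acc h
    have : l = [] := List.eq_nil_of_length_eq_zero (Nat.le_zero.mp h)
    subst this
    simp [PySem.Chars.replace.go]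
  | succ f ih =>
    intro l acc h
    cases l with
    | nil => simp [PySem.Chars.replace.go]
    | cons c t =>
      rw [PySem.Chars.replace.go]
      have hlen : t.length ≤ f := by simp only [List.length_cons] at h; omega
      by_cases hc : c = d
      · subst hc
        rw [if_pos (by simp [List.isPrefixOf])]
        rw [ih _ _ (by simpa using hlen)]
        simp
      · rw [if_neg (by simp [List.isPrefixOf]; exact fun h => hc h.symm)]
        rw [ih _ _ hlen]
        simp [hc]

theorem pv_replace_single (s : String) (d e : Char) :
    (PySem.Str.replace s (String.ofList [d]) (String.ofList [e])).toList =
      s.toList.map (fun c => if c = d then e else c) := by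
  rw [PySem.Str.toList_replace]
  simp only [String.toList_ofList]
  rw [PySem.Chars.replace]
  rw [if_neg (by simp)]
  rw [pv_go_single d e _ _ _ (le_refl _)]
  simp

theorem pv_foldl_digits : ∀ (ds : List Char), ' ' ∉ ds → ∀ (b : String),
    (ds.foldl (fun x d => PySem.Str.replace x (String.ofList [d]) (String.ofList [' '])) b).toList
      = b.toList.map (fun c => if c ∈ ds then ' ' else c) := by
  intro ds
  induction ds with
  | nil => intro _ b; simp
  | cons d rest ih =>
    intro h b
    rw [List.foldl_cons, ih (by simp at h; tauto)]
    rw [pv_replace_single, List.map_map]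
    refine List.map_congr_left fun c _ => ?_
    simp only [Function.comp_apply, List.mem_cons]
    by_cases hc : c = d
    · subst hc
      rw [if_pos rfl]
      rw [if_neg (by simp at h; tauto), if_pos (by left; rfl)]
    · rw [if_neg hc]
      by_cases hm : c ∈ rest
      · rw [if_pos hm, if_pos (by right; exact hm)]
      · rw [if_neg hm, if_neg (by simp [hc, hm])]

theorem pv_digit_mem (c : Char) :
    (if c ∈ ['1','2','3','4','5','6','7','8','9'] then ' ' else c) =
      (if '1' ≤ c ∧ c ≤ '9' then ' ' else c) := by
  by_cases h : '1' ≤ c ∧ c ≤ '9'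
  · rw [if_pos h]
    obtain ⟨h1, h2⟩ := h
    rw [Char.le_def, UInt32.le_iff_toNat_le] at h1 h2
    have hcases : c = '1' ∨ c = '2' ∨ c = '3' ∨ c = '4' ∨ c = '5' ∨ c = '6' ∨ c = '7' ∨ c = '8' ∨ c = '9' := by
      simp only [Char.ext_iff, UInt32.ext_iff]
      simp only [show ('1'.val.toNat = 49) from rfl, show ('2'.val.toNat = 50) from rfl,
        show ('3'.val.toNat = 51) from rfl, show ('4'.val.toNat = 52) from rfl,
        show ('5'.val.toNat = 53) from rfl, show ('6'.val.toNat = 54) from rfl,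
        show ('7'.val.toNat = 55) from rfl, show ('8'.val.toNat = 56) from rfl,
        show ('9'.val.toNat = 57) from rfl] at *
      omega
    rw [if_pos (by simpa using hcases)]
  · rw [if_neg h]
    have n1 : c ≠ '1' := by intro hc; subst hc; exact h (by decide)
    have n2 : c ≠ '2' := by intro hc; subst hc; exact h (by decide)
    have n3 : c ≠ '3' := by intro hc; subst hc; exact h (by decide)
    have n4 : c ≠ '4' := by intro hc; subst hc; exact h (by decide)
    have n5 : c ≠ '5' := by intro hc; subst hc; exact h (by decide)
    have n6 : c ≠ '6' := by intro hc; subst hc; exact h (by decide)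
    have n7 : c ≠ '7' := by intro hc; subst hc; exact h (by decide)
    have n8 : c ≠ '8' := by intro hc; subst hc; exact h (by decide)
    have n9 : c ≠ '9' := by intro hc; subst hc; exact h (by decide)
    rw [if_neg (by simp [n1,n2,n3,n4,n5,n6,n7,n8,n9])]

set_option maxHeartbeats 1000000 in
theorem pv_phase2 (b : String) :
    (PySem.List.pyRange 1 10 1).foldl (fun x space =>
        PySem.Str.replace x (PySem.Int.toStr space) " ") b
      = String.ofList (b.toList.map (fun c => if '1' ≤ c ∧ c ≤ '9' then ' ' else c)) := by
  rw [show PySem.List.pyRange 1 10 1 = [1,2,3,4,5,6,7,8,9] from by decide]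
  apply String.toList_inj.mp
  rw [String.toList_ofList]
  have hstep : (([1,2,3,4,5,6,7,8,9] : List Int).foldl (fun x space =>
      PySem.Str.replace x (PySem.Int.toStr space) " ") b) =
      (['1','2','3','4','5','6','7','8','9'] : List Char).foldl
        (fun x d => PySem.Str.replace x (String.ofList [d]) (String.ofList [' '])) b := by
    simp only [List.foldl_cons, List.foldl_nil]
    rw [show PySem.Int.toStr 1 = String.ofList ['1'] from by decide,
        show PySem.Int.toStr 2 = String.ofList ['2'] from by decide,
        show PySem.Int.toStr 3 = String.ofList ['3'] from by decide,
        show PySem.Int.toStr 4 = String.ofList ['4'] from by decide,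
        show PySem.Int.toStr 5 = String.ofList ['5'] from by decide,
        show PySem.Int.toStr 6 = String.ofList ['6'] from by decide,
        show PySem.Int.toStr 7 = String.ofList ['7'] from by decide,
        show PySem.Int.toStr 8 = String.ofList ['8'] from by decide,
        show PySem.Int.toStr 9 = String.ofList ['9'] from by decide,
        show (" " : String) = String.ofList [' '] from by decide]
  rw [hstep, pv_foldl_digits _ (by decide) b]
  exact List.map_congr_left fun c _ => pv_digit_mem c

-- ===== VERDICT (by name: the statement is the Claim_ definition above) =====
set_option maxHeartbeats 1000000 in
theorem draw_current_board_spec : Claim_equal_draw_current_board := by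
  intro board players_moves _
  unfold Spec_draw_current_board draw_current_board draw_current_board_alt
  simp only [pv_guard_step, pv_splitjoin_eq_replace, pv_phase2]
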